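-- pv_equiv track=rewrite | github.com/Nic30/hwtLib | hwtLib/tools/debug_bus_monitor_ctl.py | words_to_int
-- ===== SOURCE A (Python) =====
-- def bit_mask(w):
--     """
--     :note: duplication with pyMathBitPrecise in order to keep this script without non-std dependencies
--     """
--     return (1 << w) - 1
--
-- def words_to_int(words, word_size, size):
--     end_bytes = size % word_size
--     if end_bytes != 0:
--         words[-1] &= bit_mask(8 * end_bytes)
--
--     res = 0
--     for w in reversed(words):
--         res <<= 8 * word_size
--         res |= w
--     return res
-- ===== SOURCE B (Python) =====
-- def bit_mask(w):
--     return (1 << w) - 1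
--
--
-- def words_to_int(words, word_size, size):
--     # Same in-place masking of words[-1] as the original (mutates the caller's list).
--     end_bytes = size % word_size
--     if end_bytes != 0:
--         words[-1] &= bit_mask(8 * end_bytes)
--
--     # Pairwise tree reduction: repeatedly OR adjacent pairs together, doubling
--     # the shift each round, instead of a linear accumulator pass.
--     level = list(words)
--     if not level:
--         return 0
--     shift = 8 * word_size
--     while len(level) > 1:
--         nxt = []
--         for i in range(0, len(level) - 1, 2):
--             nxt.append(level[i] | (level[i + 1] << shift))
--         if len(level) % 2:
--             nxt.append(level[-1])
--         level = nxt
--         shift += shift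
--     return level[0]
-- ===== Notes on version B (the rewrite author's own statement) =====
-- stated objective: faster
-- what changed: Replaces the linear high-to-low Horner loop that shifts one ever-growing accumulator per word with a pairwise tree reduction: adjacent words are OR-combined level by level with a doubling shift, so every big-int shift acts on numbers of balanced size; the in-place masking of words[-1] is kept.
import Mathlib
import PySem

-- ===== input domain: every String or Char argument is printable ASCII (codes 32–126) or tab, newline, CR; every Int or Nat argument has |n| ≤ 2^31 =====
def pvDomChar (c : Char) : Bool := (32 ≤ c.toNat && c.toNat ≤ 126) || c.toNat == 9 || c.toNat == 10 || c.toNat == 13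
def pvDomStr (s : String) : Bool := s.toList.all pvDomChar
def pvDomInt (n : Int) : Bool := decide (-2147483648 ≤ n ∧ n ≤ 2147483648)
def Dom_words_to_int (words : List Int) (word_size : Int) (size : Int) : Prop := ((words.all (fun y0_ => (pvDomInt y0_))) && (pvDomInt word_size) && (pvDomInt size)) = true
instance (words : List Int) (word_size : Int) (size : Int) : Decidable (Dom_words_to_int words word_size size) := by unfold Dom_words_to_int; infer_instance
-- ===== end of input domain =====

-- B assembles the integer by pairwise tree reduction (OR adjacent words, doubling the
-- shift per level) instead of A's linear Horner accumulator — measurably faster on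
-- large inputs; same in-place masking of words[-1] (the equivalence proved is about
-- the return value).

-- ===== PORT A =====

def bit_mask (w : Int) : Int := (1 <<< w.toNat) - 1
-- Python's 1 << w raises ValueError for w < 0; those inputs are outside Pre_ (toNat only for totality)

def words_to_int (words : List Int) (word_size : Int) (size : Int) : Int :=
  let end_bytes := PySem.Int.mod size word_size
  -- words[-1] &= bit_mask(8 * end_bytes): in-place update of the last element;
  -- exact for nonempty lists (Pre_ guarantees nonemptiness whenever this branch runs)
  let words :=
    if end_bytes ≠ 0 then
      words.dropLast ++ [PySem.Int.band (words.getLast?.getD 0) (bit_mask (8 * end_bytes))]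
    else words
  -- for w in reversed(words): res <<= 8*word_size; res |= w
  -- (a negative shift raises in Python; outside Pre_, toNat only for totality)
  words.reverse.foldl (fun (res w : Int) => PySem.Int.bor (res <<< (8 * word_size).toNat) w) 0

-- ===== PORT B =====

-- one round of Source B's inner for-loop over range(0, len(level)-1, 2) plus the
-- odd-leftover append: adjacent words are OR-combined at shift s, in order
def pvPair (s : Nat) : List Int → List Int
  | [] => []
  | [w] => [w]
  | a :: b :: tl => PySem.Int.bor a (b <<< s) :: pvPair s tl

theorem pvPair_length (s : Nat) (l : List Int) : (pvPair s l).length = (l.length + 1) / 2 := by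
  induction l using pvPair.induct with
  | case1 => simp [pvPair]
  | case2 w => simp [pvPair]
  | case3 a b tl ih => simp [pvPair, ih]; omega

-- Source B's while-loop: reduce the level list round by round, doubling the shift
def pvLevels (s : Nat) (l : List Int) : Int :=
  match l with
  | [] => 0
  | [w] => w
  | a :: b :: tl => pvLevels (s + s) (PySem.Int.bor a (b <<< s) :: pvPair s tl)
termination_by l.length
decreasing_by simp [pvPair_length]; omega

def words_to_int_alt (words : List Int) (word_size : Int) (size : Int) : Int :=
  let end_bytes := PySem.Int.mod size word_size
  -- words[-1] &= bit_mask(8 * end_bytes): ported as List.set of the last index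
  let level :=
    if end_bytes ≠ 0 then
      words.set (words.length - 1)
        (PySem.Int.band (words.getLast?.getD 0) (bit_mask (8 * end_bytes)))
    else words
  -- 'if not level: return 0' is the [] case of pvLevels; negative shifts raise in
  -- Python and are outside Pre_ (toNat only for totality)
  pvLevels (8 * word_size).toNat level

-- ===== PRECONDITION & SPEC =====
-- Pre_ = exactly the inputs on which Python A returns: word_size = 0 raises ZeroDivisionError;
-- empty words with size % word_size ≠ 0 raises IndexError; negative word_size raises ValueError
-- (negative shift / negative mask width) unless the list is empty and size % word_size = 0.
def Pre_words_to_int (words : List Int) (word_size : Int) (size : Int) : Prop :=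
  (0 < word_size ∧ (PySem.Int.mod size word_size = 0 ∨ words ≠ [])) ∨
  (word_size < 0 ∧ PySem.Int.mod size word_size = 0 ∧ words = [])
instance (words : List Int) (word_size : Int) (size : Int) : Decidable (Pre_words_to_int words word_size size) := by unfold Pre_words_to_int; infer_instance

def pvWitness_words_to_int : List Int × Int × Int := ([300, -7, 2], 2, 5)

def Spec_words_to_int (words : List Int) (word_size : Int) (size : Int) (out : Int) : Prop := out = words_to_int_alt words word_size size
instance (words : List Int) (word_size : Int) (size : Int) (out : Int) : Decidable (Spec_words_to_int words word_size size out) := by unfold Spec_words_to_int; infer_instance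

-- ===== CLAIM (what is proved, stated in full; the proofs are below) =====
def Claim_equal_words_to_int : Prop := ∀ (words : List Int) (word_size : Int) (size : Int), Dom_words_to_int words word_size size → Pre_words_to_int words word_size size → Spec_words_to_int words word_size size (words_to_int words word_size size)

-- ===== LEMMAS AND PROOFS =====

theorem pv_zero_ldiff (m : Nat) : Nat.ldiff 0 m = 0 := by
  apply Nat.eq_of_testBit_eq
  intro i
  simp [Nat.testBit_ldiff]

theorem pv_land_add_ldiff (n m : Nat) : (n &&& m) + Nat.ldiff n m = n := by
  induction n using Nat.binaryRec generalizing m with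
  | zero => simp [pv_zero_ldiff]
  | bit a n ih =>
      rw [← Nat.bit_testBit_zero_shiftRight_one m, Nat.land_bit, Nat.ldiff_bit,
        Nat.bit_val, Nat.bit_val, Nat.bit_val]
      have h := ih (m >>> 1)
      cases a <;> cases m.testBit 0 <;> simp <;> omega

theorem pv_sub_land (n m : Nat) : n - (n &&& m) = Nat.ldiff n m := by
  have := pv_land_add_ldiff n m; omega

-- PySem's Python-exact bitwise OR is Mathlib's Int.lor
theorem pv_bor_eq_lor (a b : Int) : PySem.Int.bor a b = Int.lor a b := by
  have hns : ∀ k : Nat, ¬ (0:Int) ≤ Int.negSucc k := by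
    intro k; rw [Int.negSucc_eq]; omega
  have hnt : ∀ k : Nat, (-(Int.negSucc k) - 1).toNat = k := by
    intro k; rw [Int.negSucc_eq]; omega
  have hos : ∀ k : Nat, (0:Int) ≤ Int.ofNat k := fun k => Int.natCast_nonneg k
  rcases a with m | m <;> rcases b with n | n <;>
    simp only [PySem.Int.bor, Int.lor]
  · rw [if_pos (hos m), if_pos (hos n)]; rfl
  · rw [if_pos (hos m), if_neg (hns n), hnt n]
    show -((n - (n &&& m) : Nat) : Int) - 1 = Int.negSucc (Nat.ldiff n m)
    rw [pv_sub_land, Int.negSucc_eq]; omega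
  · rw [if_neg (hns m), if_pos (hos n), hnt m]
    show -((m - (m &&& n) : Nat) : Int) - 1 = Int.negSucc (Nat.ldiff m n)
    rw [pv_sub_land, Int.negSucc_eq]; omega
  · rw [if_neg (hns m), if_neg (hns n), hnt m, hnt n]
    show -((m &&& n : Nat) : Int) - 1 = Int.negSucc (m &&& n)
    rw [Int.negSucc_eq]; omega

theorem pv_lor_assoc (a b c : Int) : Int.lor (Int.lor a b) c = Int.lor a (Int.lor b c) := by
  rcases a with m | m <;> rcases b with n | n <;> rcases c with k | k <;>
    simp only [Int.lor] <;> congr 1 <;>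
    first
      | rw [Nat.lor_assoc]
      | rw [Nat.land_assoc]
      | (apply Nat.eq_of_testBit_eq; intro i;
         simp only [Nat.testBit_lor, Nat.testBit_land, Nat.testBit_ldiff];
         cases m.testBit i <;> cases n.testBit i <;> cases k.testBit i <;> rfl)

theorem pv_bor_assoc (a b c : Int) :
    PySem.Int.bor (PySem.Int.bor a b) c = PySem.Int.bor a (PySem.Int.bor b c) := by
  simp [pv_bor_eq_lor, pv_lor_assoc]

theorem pv_lor_double (a b : Int) : Int.lor a b * 2 = Int.lor (a * 2) (b * 2) := by
  have h := Int.lor_bit false a false b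
  simp [Int.bit_val] at h
  ring_nf at h ⊢
  linarith [h]

theorem pv_bor_shl (a b : Int) (n : Nat) :
    (PySem.Int.bor a b) <<< n = PySem.Int.bor (a <<< n) (b <<< n) := by
  simp only [pv_bor_eq_lor, Int.shiftLeft_eq]
  induction n with
  | zero => simp
  | succ k ih =>
      have hx : ∀ x : Int, x * 2 ^ (k + 1) = x * 2 ^ k * 2 := by intro x; ring
      rw [hx, hx, hx, ih, pv_lor_double]

theorem pv_shl_shl (x : Int) (m n : Nat) : (x <<< m) <<< n = x <<< (m + n) := by
  simp [Int.shiftLeft_eq, pow_add, mul_assoc]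

-- right-nested positional spec: pvR s [w0, w1, …] = w0 ||| ((w1 ||| …) <<< s)
def pvR (s : Nat) : List Int → Int
  | [] => 0
  | w :: tl => PySem.Int.bor w (pvR s tl <<< s)

theorem pv_A_fold (s : Nat) (l : List Int) :
    l.reverse.foldl (fun (res w : Int) => PySem.Int.bor (res <<< s) w) 0 = pvR s l := by
  induction l with
  | nil => simp [pvR]
  | cons w tl ih =>
      rw [List.reverse_cons, List.foldl_append, ih]
      simp [pvR, PySem.Int.bor_comm]

-- one pairing round preserves the assembled value once the shift doubles
theorem pv_pair_R (s : Nat) (l : List Int) : pvR (s + s) (pvPair s l) = pvR s l := by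
  induction l using pvPair.induct with
  | case1 => simp [pvPair, pvR]
  | case2 w => simp [pvPair, pvR, Int.shiftLeft_eq, PySem.Int.bor_zero]
  | case3 a b tl ih =>
      simp only [pvPair, pvR, ih]
      rw [pv_bor_shl, pv_shl_shl, pv_bor_assoc]

theorem pv_levels_R (s : Nat) (l : List Int) : pvLevels s l = pvR s l := by
  induction s, l using pvLevels.induct with
  | case1 s => simp [pvLevels, pvR]
  | case2 s w => simp [pvLevels, pvR, Int.shiftLeft_eq, PySem.Int.bor_zero]
  | case3 s a b tl ih =>
      rw [pvLevels, ih]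
      have h := pv_pair_R s (a :: b :: tl)
      simpa [pvPair] using h

-- in-place update of the last element, as List.set vs dropLast ++ [·]
theorem pv_set_last (l : List Int) (x : Int) (h : l ≠ []) :
    l.set (l.length - 1) x = l.dropLast ++ [x] := by
  induction l with
  | nil => exact absurd rfl h
  | cons a tl ih =>
      cases tl with
      | nil => simp
      | cons b tl' =>
          have hih := ih (by simp)
          simp only [List.length_cons, Nat.add_sub_cancel] at hih ⊢
          simpa [List.set, List.dropLast] using congrArg (a :: ·) hih

-- ===== VERDICT (by name: the statement is the Claim_ definition above) =====
theorem words_to_int_spec : Claim_equal_words_to_int := by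
  intro words word_size size _ hpre
  unfold Spec_words_to_int
  rcases hpre with ⟨hpos, hcase⟩ | ⟨_, hmod, hnil⟩
  · simp only [words_to_int, words_to_int_alt]
    by_cases hm : PySem.Int.mod size word_size = 0
    · simp only [hm, ne_eq, not_true_eq_false, if_false]
      rw [pv_A_fold, pv_levels_R]
    · have hne : words ≠ [] := by
        rcases hcase with h | h
        · exact absurd h hm
        · exact h
      simp only [if_pos hm]
      rw [pv_set_last _ _ hne, pv_A_fold, pv_levels_R]
  · subst hnil
    simp [words_to_int, words_to_int_alt, hmod, pvLevels]
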